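-- pv_equiv track=rewrite | github.com/leobikotech/claw-agent | claw_agent/memory/session_prompts.py | _analyze_section_sizes
-- ===== SOURCE A (Python) =====
-- _CHARS_PER_TOKEN = 4
--
-- def _rough_token_count(text: str) -> int:
--     """Rough token estimate (length / 4)."""
--     return len(text) // _CHARS_PER_TOKEN
--
-- def _analyze_section_sizes(content: str) -> dict[str, int]:
--     """Parse session notes and return {section_header: token_count}.
--     Maps to: analyzeSectionSizes() in prompts.ts
--     """
--     sections: dict[str, int] = {}
--     lines = content.split("\n")
--     current_section = ""
--     current_content: list[str] = []
--
--     for line in lines: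
--         if line.startswith("# "):
--             if current_section and current_content:
--                 section_text = "\n".join(current_content).strip()
--                 sections[current_section] = _rough_token_count(section_text)
--             current_section = line
--             current_content = []
--         else:
--             current_content.append(line)
--
--     if current_section and current_content:
--         section_text = "\n".join(current_content).strip()
--         sections[current_section] = _rough_token_count(section_text)
--
--     return sections
-- ===== SOURCE B (Python) =====
-- _CHARS_PER_TOKEN = 4
--
--
-- def _rough_token_count(text: str) -> int:
--     return len(text) // _CHARS_PER_TOKEN
--
--
-- def _parse_sections(lines):
--     """First pass: split lines into (header, body_lines) pairs, in order."""
--     pairs = []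
--     i, n = 0, len(lines)
--     while i < n:
--         if lines[i].startswith("# "):
--             j = i + 1
--             while j < n and not lines[j].startswith("# "):
--                 j += 1
--             pairs.append((lines[i], lines[i + 1:j]))
--             i = j
--         else:
--             i += 1
--     return pairs
--
--
-- def _analyze_section_sizes(content: str) -> dict:
--     sections: dict = {}
--     for header, body in _parse_sections(content.split("\n")):
--         if body:
--             sections[header] = _rough_token_count("\n".join(body).strip())
--     return sections
-- ===== Notes on version B (the rewrite author's own statement) =====
-- stated objective: alternative
-- what changed: Replaces A's single stateful accumulator loop (current_section/current_content carried across iterations with an end-of-loop flush) by a two-phase decomposition: a first index pass cuts the line list into (header, body-slice) pairs, then a simple dict-building pass over those pairs.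
import Mathlib
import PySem

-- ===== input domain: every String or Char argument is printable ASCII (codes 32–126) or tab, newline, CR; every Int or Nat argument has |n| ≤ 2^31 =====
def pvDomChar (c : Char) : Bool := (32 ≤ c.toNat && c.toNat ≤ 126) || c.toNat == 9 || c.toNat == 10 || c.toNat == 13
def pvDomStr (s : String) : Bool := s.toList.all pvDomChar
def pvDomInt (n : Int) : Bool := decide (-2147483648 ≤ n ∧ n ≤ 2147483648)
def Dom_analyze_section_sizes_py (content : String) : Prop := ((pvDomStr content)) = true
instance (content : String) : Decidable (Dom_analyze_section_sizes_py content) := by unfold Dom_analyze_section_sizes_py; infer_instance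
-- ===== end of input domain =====

-- B replaces A's single stateful accumulator loop by a two-phase decomposition
-- (cut the lines into (header, body) pairs first, then build the dict); same cost, no speed claim.

-- shared helper: _rough_token_count("\n".join(body).strip())  (both Pythons compute this)
def pvTok (body : List String) : Int :=
  PySem.Int.floordiv ((PySem.Str.len (PySem.Str.strip (PySem.Str.join "\n" body)) : Int)) 4

def pvIsHdr (l : String) : Bool := PySem.Str.startswith l "# "

-- ===== PORT A =====
-- the for-loop of A, carrying (sections, current_section, current_content)
def pvALoop (sections : PySem.Dict String Int) (cur : String) (acc : List String) :
    List String → PySem.Dict String Int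
  | [] => if cur ≠ "" ∧ acc ≠ [] then sections.insert cur (pvTok acc) else sections
  | l :: ls =>
    if pvIsHdr l then
      pvALoop (if cur ≠ "" ∧ acc ≠ [] then sections.insert cur (pvTok acc) else sections) l [] ls
    else
      pvALoop sections cur (acc ++ [l]) ls

def analyze_section_sizes_py (content : String) : List (String × Int) :=
  (pvALoop PySem.Dict.empty "" [] ((PySem.Str.split? content "\n").getD [])).items

-- ===== PORT B =====
-- first pass of B (iterative index scan over an unchanged list, ported as the
-- exact structural recursion on the suffix: the inner `while j` scan is the
-- takeWhile of the non-header predicate and `i = j` the matching dropWhile)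
def pvParseSections : List String → List (String × List String)
  | [] => []
  | l :: ls =>
    if pvIsHdr l then
      (l, ls.takeWhile (fun x => !pvIsHdr x)) ::
        pvParseSections (ls.dropWhile (fun x => !pvIsHdr x))
    else
      pvParseSections ls
termination_by ls => ls.length
decreasing_by
  · exact Nat.lt_succ_of_le (List.length_dropWhile_le _ _)
  · exact Nat.lt_succ_self _

-- second pass of B: the dict-building for-loop over the pairs
def pvBFold (d : PySem.Dict String Int) (ps : List (String × List String)) : PySem.Dict String Int :=
  ps.foldl (fun d p => if p.2 ≠ [] then d.insert p.1 (pvTok p.2) else d) d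

def analyze_section_sizes_py_alt (content : String) : List (String × Int) :=
  (pvBFold PySem.Dict.empty (pvParseSections ((PySem.Str.split? content "\n").getD []))).items

-- ===== PRECONDITION & SPEC =====
def Spec_analyze_section_sizes_py (content : String) (out : List (String × Int)) : Prop := out = analyze_section_sizes_py_alt content
instance (content : String) (out : List (String × Int)) : Decidable (Spec_analyze_section_sizes_py content out) := by unfold Spec_analyze_section_sizes_py; infer_instance

-- ===== CLAIM (what is proved, stated in full; the proofs are below) =====
def Claim_equal_analyze_section_sizes_py : Prop := ∀ (content : String), Dom_analyze_section_sizes_py content → Spec_analyze_section_sizes_py content (analyze_section_sizes_py content)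

-- ===== LEMMAS AND PROOFS =====

theorem hdr_ne_empty {h : String} (hh : pvIsHdr h = true) : h ≠ "" := by
  intro he; subst he; exact absurd hh (by decide)

-- inside a section h with already-accumulated body acc, A's loop matches
-- "flush acc ++ takeWhile, then continue at the dropWhile" of B
theorem aLoop_header (ls : List String) : ∀ (h : String) (acc : List String)
    (d : PySem.Dict String Int), pvIsHdr h = true →
    pvALoop d h acc ls =
      pvBFold
        (if acc ++ ls.takeWhile (fun x => !pvIsHdr x) ≠ [] then
          d.insert h (pvTok (acc ++ ls.takeWhile (fun x => !pvIsHdr x))) else d)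
        (pvParseSections (ls.dropWhile (fun x => !pvIsHdr x))) := by
  induction ls with
  | nil =>
    intro h acc d hh
    simp [pvALoop, pvParseSections, pvBFold, hdr_ne_empty hh]
  | cons l ls ih =>
    intro h acc d hh
    by_cases hl : pvIsHdr l = true
    · rw [pvALoop]
      simp only [hl, if_true, List.takeWhile_cons, List.dropWhile_cons,
        Bool.not_true, Bool.false_eq_true, if_false, List.append_nil]
      rw [ih l [] _ hl, pvParseSections]
      simp only [hl, if_true, pvBFold, List.foldl_cons, List.nil_append]
      simp [hdr_ne_empty hh]
    · rw [pvALoop]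
      simp only [hl, List.takeWhile_cons, List.dropWhile_cons, Bool.not_eq_true']
      rw [ih h (acc ++ [l]) d hh]
      simp [List.append_assoc]

-- before the first header, A's loop ignores its accumulator
theorem aLoop_pre (ls : List String) : ∀ (acc : List String) (d : PySem.Dict String Int),
    pvALoop d "" acc ls = pvBFold d (pvParseSections ls) := by
  induction ls with
  | nil => intro acc d; simp [pvALoop, pvParseSections, pvBFold]
  | cons l ls ih =>
    intro acc d
    by_cases hl : pvIsHdr l = true
    · rw [pvALoop]
      simp only [hl, if_true, ne_eq, not_true_eq_false, false_and, if_false]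
      rw [aLoop_header ls l [] d hl, pvParseSections]
      simp only [hl, if_true, pvBFold, List.foldl_cons, List.nil_append]
    · rw [pvALoop, pvParseSections]
      simp only [hl]
      exact ih (acc ++ [l]) d

-- ===== VERDICT (by name: the statement is the Claim_ definition above) =====
theorem analyze_section_sizes_py_spec : Claim_equal_analyze_section_sizes_py := by
  intro content _
  show _ = _
  unfold analyze_section_sizes_py analyze_section_sizes_py_alt
  rw [aLoop_pre]
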